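-- pv_equiv track=rewrite | github.com/wzwvivi/data_analysis | backend/app/services/workbench_summaries/fms.py | _category_breakdown_sentence
-- ===== SOURCE A (Python) =====
-- from typing import Any, Dict, List, Optional
--
-- def _category_breakdown_sentence(agg: Dict[str, Any]) -> Optional[str]:
--     """按 category 写一句"哪类有几条不通过"。"""
--     parts: List[str] = []
--     for cat, counts in agg["by_category"].items():
--         if counts["fail"] == 0 and counts["warning"] == 0:
--             continue
--         if counts["fail"] and counts["warning"]:
--             parts.append(f"{cat} 失败 {counts['fail']}、告警 {counts['warning']}")
--         elif counts["fail"]: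
--             parts.append(f"{cat} 失败 {counts['fail']}")
--         else:
--             parts.append(f"{cat} 告警 {counts['warning']}")
--     if not parts:
--         return None
--     return "检查单分类：" + "；".join(parts) + "，建议优先复核"
-- ===== SOURCE B (Python) =====
-- from typing import Any, Dict, List, Optional
--
--
-- def _category_breakdown_sentence(agg: Dict[str, Any]) -> Optional[str]:
--     """Recursive right-fold: builds the '；'-joined body string directly (no parts
--     list, no final join), combining each category's optional fragment with the
--     already-joined tail."""
--     items = list(agg["by_category"].items())
--
--     def go(i: int) -> Optional[str]:
--         # joined body for items[i:], or None when nothing failed/warned there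
--         if i == len(items):
--             return None
--         cat, counts = items[i]
--         pieces: List[str] = []
--         if counts["fail"]:
--             pieces.append(f"失败 {counts['fail']}")
--         if counts["warning"]:
--             pieces.append(f"告警 {counts['warning']}")
--         frag = (f"{cat} " + "、".join(pieces)) if pieces else None
--         rest = go(i + 1)
--         if frag is None:
--             return rest
--         if rest is None:
--             return frag
--         return frag + "；" + rest
--
--     body = go(0)
--     if body is None:
--         return None
--     return "检查单分类：" + body + "，建议优先复核"
-- ===== Notes on version B (the rewrite author's own statement) =====
-- stated objective: alternative
-- what changed: Replaces A's accumulate-parts-then-'；'.join loop by a recursive right-fold over the categories that builds the joined body string directly, combining each category's optional fragment (itself a collect-and-'、'-join of the two nonzero counts) with the already-joined tail; no parts list and no final join exist in B.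
import Mathlib
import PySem

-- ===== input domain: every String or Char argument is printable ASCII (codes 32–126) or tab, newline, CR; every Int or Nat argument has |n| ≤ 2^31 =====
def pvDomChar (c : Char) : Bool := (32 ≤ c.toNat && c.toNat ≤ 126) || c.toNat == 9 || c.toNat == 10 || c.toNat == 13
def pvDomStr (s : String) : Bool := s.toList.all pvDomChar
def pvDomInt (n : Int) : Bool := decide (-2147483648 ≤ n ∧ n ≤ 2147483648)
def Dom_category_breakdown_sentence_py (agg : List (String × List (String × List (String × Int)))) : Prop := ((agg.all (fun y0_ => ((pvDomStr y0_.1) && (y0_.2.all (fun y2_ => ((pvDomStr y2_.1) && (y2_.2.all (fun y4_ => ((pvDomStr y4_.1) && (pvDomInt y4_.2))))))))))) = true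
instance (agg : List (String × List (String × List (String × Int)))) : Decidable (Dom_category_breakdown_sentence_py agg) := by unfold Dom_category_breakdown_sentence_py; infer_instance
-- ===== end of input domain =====

-- B replaces A's collect-parts-then-join loop by a recursive right-fold that builds the
-- '；'-joined body string directly from each category's optional fragment: alternative decomposition, same cost.

-- dict lookup d[k] as first match in the association list (exact: Python dicts have unique keys);
-- the .getD 0 default is only reached outside Pre_, where the Python raises KeyError.
def pvLookupD {α : Type} (d : List (String × α)) (k : String) (dflt : α) : α :=
  (List.lookup k d).getD dflt

-- ===== PORT A =====
def category_breakdown_sentence_py (agg : List (String × List (String × List (String × Int)))) : Option String :=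
  let byCat := pvLookupD agg "by_category" []
  let parts := byCat.foldl (fun (parts : List String) cc =>
    let f := pvLookupD cc.2 "fail" 0
    let w := pvLookupD cc.2 "warning" 0
    if f = 0 ∧ w = 0 then parts
    else if f ≠ 0 ∧ w ≠ 0 then
      parts ++ [cc.1 ++ " 失败 " ++ PySem.Int.toStr f ++ "、告警 " ++ PySem.Int.toStr w]
    else if f ≠ 0 then parts ++ [cc.1 ++ " 失败 " ++ PySem.Int.toStr f]
    else parts ++ [cc.1 ++ " 告警 " ++ PySem.Int.toStr w]) []
  if parts = [] then none
  else some ("检查单分类：" ++ PySem.Str.join "；" parts ++ "，建议优先复核")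

-- ===== PORT B =====
-- one category's fragment (the two optional pieces, '、'-joined), as in Source B's loop body
def pvFrag (cc : String × List (String × Int)) : Option String :=
  let f := pvLookupD cc.2 "fail" 0
  let w := pvLookupD cc.2 "warning" 0
  let pieces := (if f ≠ 0 then ["失败 " ++ PySem.Int.toStr f] else []) ++
                (if w ≠ 0 then ["告警 " ++ PySem.Int.toStr w] else [])
  if pieces = [] then none else some (cc.1 ++ " " ++ PySem.Str.join "、" pieces)

-- Source B's recursive go: the '；'-joined body for the remaining categories, or none
def pvGo : List (String × List (String × Int)) → Option String
  | [] => none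
  | cc :: rest =>
    match pvFrag cc, pvGo rest with
    | none, r => r
    | some fr, none => some fr
    | some fr, some r => some (fr ++ "；" ++ r)

def category_breakdown_sentence_py_alt (agg : List (String × List (String × List (String × Int)))) : Option String :=
  match pvGo (pvLookupD agg "by_category" []) with
  | none => none
  | some body => some ("检查单分类：" ++ body ++ "，建议优先复核")

-- ===== PRECONDITION & SPEC =====
-- Pre_ excludes exactly the inputs where the Python A raises KeyError: a missing
-- "by_category" key, or an inner counts dict missing "fail" or "warning" (B raises there too).
def Pre_category_breakdown_sentence_py (agg : List (String × List (String × List (String × Int)))) : Prop :=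
  ("by_category" ∈ agg.map Prod.fst) ∧
  ∀ cc ∈ (List.lookup "by_category" agg).getD [],
    ("fail" ∈ cc.2.map Prod.fst) ∧ ("warning" ∈ cc.2.map Prod.fst)
instance (agg : List (String × List (String × List (String × Int)))) : Decidable (Pre_category_breakdown_sentence_py agg) := by unfold Pre_category_breakdown_sentence_py; infer_instance

def pvWitness_category_breakdown_sentence_py : (List (String × List (String × List (String × Int)))) :=
  [("by_category", [("disk", [("fail", 2), ("warning", 0)]), ("net", [("fail", 0), ("warning", 3)])])]

def Spec_category_breakdown_sentence_py (agg : List (String × List (String × List (String × Int)))) (out : Option String) : Prop := out = category_breakdown_sentence_py_alt agg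
instance (agg : List (String × List (String × List (String × Int)))) (out : Option String) : Decidable (Spec_category_breakdown_sentence_py agg out) := by unfold Spec_category_breakdown_sentence_py; infer_instance

-- ===== CLAIM (what is proved, stated in full; the proofs are below) =====
def Claim_equal_category_breakdown_sentence_py : Prop := ∀ (agg : List (String × List (String × List (String × Int)))), Dom_category_breakdown_sentence_py agg → Pre_category_breakdown_sentence_py agg → Spec_category_breakdown_sentence_py agg (category_breakdown_sentence_py agg)

-- ===== LEMMAS AND PROOFS =====

-- One step of A's loop appends exactly the optional fragment pvFrag produces.
theorem pv_step_eq (parts : List String) (cc : String × List (String × Int)) :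
    (let f := pvLookupD cc.2 "fail" 0
     let w := pvLookupD cc.2 "warning" 0
     if f = 0 ∧ w = 0 then parts
     else if f ≠ 0 ∧ w ≠ 0 then
       parts ++ [cc.1 ++ " 失败 " ++ PySem.Int.toStr f ++ "、告警 " ++ PySem.Int.toStr w]
     else if f ≠ 0 then parts ++ [cc.1 ++ " 失败 " ++ PySem.Int.toStr f]
     else parts ++ [cc.1 ++ " 告警 " ++ PySem.Int.toStr w]) =
    parts ++ (pvFrag cc).toList := by
  by_cases hf : pvLookupD cc.2 "fail" 0 = 0 <;>
    by_cases hw : pvLookupD cc.2 "warning" 0 = 0 <;>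
      simp [pvFrag, hf, hw] <;>
        (apply String.toList_injective;
         simp [PySem.Str.join, PySem.Chars.join, List.intercalate])

-- A's accumulation loop computes the list of fragments, for any initial accumulator.
theorem pv_loop_eq (l : List (String × List (String × Int))) (parts : List String) :
    l.foldl (fun (parts : List String) cc =>
      let f := pvLookupD cc.2 "fail" 0
      let w := pvLookupD cc.2 "warning" 0
      if f = 0 ∧ w = 0 then parts
      else if f ≠ 0 ∧ w ≠ 0 then
        parts ++ [cc.1 ++ " 失败 " ++ PySem.Int.toStr f ++ "、告警 " ++ PySem.Int.toStr w]
      else if f ≠ 0 then parts ++ [cc.1 ++ " 失败 " ++ PySem.Int.toStr f]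
      else parts ++ [cc.1 ++ " 告警 " ++ PySem.Int.toStr w]) parts =
    parts ++ l.filterMap pvFrag := by
  induction l generalizing parts with
  | nil => simp
  | cons hd tl ih =>
    simp only [List.foldl_cons, List.filterMap_cons]
    rw [ih, pv_step_eq]
    cases pvFrag hd <;> simp

-- '；'.join on a cons with nonempty tail splits off the head.
theorem pv_join_cons (p : String) (ps : List String) (h : ps ≠ []) :
    PySem.Str.join "；" (p :: ps) = p ++ "；" ++ PySem.Str.join "；" ps := by
  apply String.toList_injective
  cases ps with
  | nil => exact absurd rfl h
  | cons q qs => simp [PySem.Str.join, PySem.Chars.join, List.intercalate]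

-- B's recursion computes '；'.join of the fragment list (none when it is empty).
theorem pv_go_eq (l : List (String × List (String × Int))) :
    pvGo l = match l.filterMap pvFrag with
             | [] => none
             | ps => some (PySem.Str.join "；" ps) := by
  induction l with
  | nil => rfl
  | cons hd tl ih =>
    simp only [pvGo, List.filterMap_cons, ih]
    cases hfr : pvFrag hd with
    | none => rfl
    | some fr =>
      cases hps : tl.filterMap pvFrag with
      | nil => simp [PySem.Str.join, PySem.Chars.join, List.intercalate]
      | cons q qs => simp [pv_join_cons fr (q :: qs) (by simp)]

-- ===== VERDICT (by name: the statement is the Claim_ definition above) =====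
theorem category_breakdown_sentence_py_spec : Claim_equal_category_breakdown_sentence_py := by
  intro agg _ _
  unfold Spec_category_breakdown_sentence_py
  simp only [category_breakdown_sentence_py, category_breakdown_sentence_py_alt]
  rw [pv_loop_eq, pv_go_eq]
  cases (pvLookupD agg "by_category" []).filterMap pvFrag <;> simp
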